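-- pv_equiv track=rewrite | github.com/holycrap872/ucls-ml-ai | CourseMaterial/03_list_sets_maps/08_ngrams/predict.py | ingest
-- ===== SOURCE A (Python) =====
-- def ingest(text_words: list[str]) -> dict[str, dict[str, int]]:
--     ngram_map: dict[str, dict[str, int]] = {}
--
--     for i in range(len(text_words) - 3):
--         word_0 = text_words[i]
--         word_1 = text_words[i + 1]
--         word_2 = text_words[i + 2]
--
--         n_gram = "-".join([word_0, word_1, word_2])
--         if n_gram not in ngram_map:
--             ngram_map[n_gram] = {}
--
--         next_word = text_words[i + 3]
--         if next_word not in ngram_map[n_gram]: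
--             ngram_map[n_gram][next_word] = 0
--
--         ngram_map[n_gram][next_word] += 1
--
--     return ngram_map
-- ===== SOURCE B (Python) =====
-- def ingest(text_words: list[str]) -> dict[str, dict[str, int]]:
--     # Phase 1: one pass, flat frequency table keyed by (trigram string, next word).
--     counts: dict[tuple[str, str], int] = {}
--     for w0, w1, w2, nxt in zip(text_words, text_words[1:], text_words[2:], text_words[3:]):
--         key = ("-".join([w0, w1, w2]), nxt)
--         counts[key] = counts.get(key, 0) + 1
--     # Phase 2: pivot the flat table into the nested dict.
--     result: dict[str, dict[str, int]] = {}
--     for (gram, nxt), c in counts.items():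
--         result.setdefault(gram, {})[nxt] = c
--     return result
-- ===== Notes on version B (the rewrite author's own statement) =====
-- stated objective: alternative
-- what changed: Instead of growing the nested dict directly while scanning windows, B first builds a flat frequency table keyed by (trigram,next-word) pairs in one pass over zipped slices, then pivots that table into the nested dict in a separate pass.
import Mathlib
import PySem

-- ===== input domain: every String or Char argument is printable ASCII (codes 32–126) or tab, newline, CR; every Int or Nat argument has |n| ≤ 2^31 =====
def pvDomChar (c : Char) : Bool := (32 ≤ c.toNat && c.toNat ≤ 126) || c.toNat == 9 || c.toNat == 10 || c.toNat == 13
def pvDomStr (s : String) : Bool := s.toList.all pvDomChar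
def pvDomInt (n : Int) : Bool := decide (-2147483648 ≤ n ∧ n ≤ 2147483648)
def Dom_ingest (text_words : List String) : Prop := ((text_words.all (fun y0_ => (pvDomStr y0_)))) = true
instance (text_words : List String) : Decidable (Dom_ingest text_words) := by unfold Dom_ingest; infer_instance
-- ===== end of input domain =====

-- B replaces A's direct growth of the nested dict by a flat (trigram, next-word) counter
-- built in one pass over zipped slices, pivoted into the nested dict in a second pass
-- (objective: alternative decomposition; same asymptotic cost).

-- ===== PORT A =====
-- Literal port of A. Indices i, i+1, i+2, i+3 are always in range (i ∈ range(len-3)),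
-- so pyGetD's default is never used (Python never raises here).
def ingest (text_words : List String) : List (String × List (String × Int)) :=
  let ngram_map : PySem.Dict String (PySem.Dict String Int) :=
    (PySem.List.pyRange 0 ((text_words.length : Int) - 3) 1).foldl (fun ngram_map i =>
      let word_0 := PySem.List.pyGetD text_words i ""
      let word_1 := PySem.List.pyGetD text_words (i + 1) ""
      let word_2 := PySem.List.pyGetD text_words (i + 2) ""
      let n_gram := PySem.Str.join "-" [word_0, word_1, word_2]
      let ngram_map := if ngram_map.contains n_gram then ngram_map
                       else ngram_map.insert n_gram PySem.Dict.empty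
      let next_word := PySem.List.pyGetD text_words (i + 3) ""
      let inner := ngram_map.getD n_gram PySem.Dict.empty
      let inner := if inner.contains next_word then inner else inner.insert next_word 0
      ngram_map.insert n_gram (inner.insert next_word (inner.getD next_word 0 + 1)))
      PySem.Dict.empty
  ngram_map.items.map (fun p => (p.1, p.2.items))

-- ===== PORT B =====
-- Literal port of B (Source B): zip(text_words, text_words[1:], text_words[2:], text_words[3:])
-- as nested List.zip of slices; flat counter keyed by (trigram, next word); then the pivot.
def ingest_alt (text_words : List String) : List (String × List (String × Int)) :=
  let windows :=
    ((text_words.zip (PySem.List.slice text_words (some 1) none)).zip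
      (PySem.List.slice text_words (some 2) none)).zip
      (PySem.List.slice text_words (some 3) none)
  let counts : PySem.Dict (String × String) Int :=
    windows.foldl (fun counts w =>
      let key := (PySem.Str.join "-" [w.1.1.1, w.1.1.2, w.1.2], w.2)
      counts.insert key (counts.getD key 0 + 1)) PySem.Dict.empty
  let result : PySem.Dict String (PySem.Dict String Int) :=
    counts.items.foldl (fun result q =>
      let result := result.setdefault q.1.1 PySem.Dict.empty
      result.insert q.1.1 ((result.getD q.1.1 PySem.Dict.empty).insert q.1.2 q.2))
      PySem.Dict.empty
  result.items.map (fun p => (p.1, p.2.items))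

-- ===== PRECONDITION & SPEC =====
def Spec_ingest (text_words : List String) (out : List (String × List (String × Int))) : Prop := out = ingest_alt text_words
instance (text_words : List String) (out : List (String × List (String × Int))) : Decidable (Spec_ingest text_words out) := by unfold Spec_ingest; infer_instance

-- ===== CLAIM (what is proved, stated in full; the proofs are below) =====
def Claim_equal_ingest : Prop := ∀ (text_words : List String), Dom_ingest text_words → Spec_ingest text_words (ingest text_words)

-- ===== LEMMAS AND PROOFS =====

-- The canonical one-window update of the nested dict.
def stepN (d : PySem.Dict String (PySem.Dict String Int)) (p : String × String) :
    PySem.Dict String (PySem.Dict String Int) :=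
  d.insert p.1 ((d.getD p.1 PySem.Dict.empty).insert p.2
    ((d.getD p.1 PySem.Dict.empty).getD p.2 0 + 1))

def nestedBuild (l : List (String × String)) : PySem.Dict String (PySem.Dict String Int) :=
  l.foldl stepN PySem.Dict.empty

-- One step of the pivot pass.
def pStep (r : PySem.Dict String (PySem.Dict String Int)) (q : (String × String) × Int) :
    PySem.Dict String (PySem.Dict String Int) :=
  r.insert q.1.1 ((r.getD q.1.1 PySem.Dict.empty).insert q.1.2 q.2)

def pivotD (F : PySem.Dict (String × String) Int) : PySem.Dict String (PySem.Dict String Int) :=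
  F.items.foldl pStep PySem.Dict.empty

def keyfun (w : ((String × String) × String) × String) : String × String :=
  (PySem.Str.join "-" [w.1.1.1, w.1.1.2, w.1.2], w.2)

def winAt (tw : List String) (k : Nat) : ((String × String) × String) × String :=
  (((tw.getD k "", tw.getD (k + 1) ""), tw.getD (k + 2) ""), tw.getD (k + 3) "")

-- A's let-chain per window equals stepN.
lemma stepA_eq (d : PySem.Dict String (PySem.Dict String Int)) (g n : String) :
    (let d1 := if d.contains g then d else d.insert g PySem.Dict.empty
     let i := d1.getD g PySem.Dict.empty
     let i2 := if i.contains n then i else i.insert n 0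
     d1.insert g (i2.insert n (i2.getD n 0 + 1))) = stepN d (g, n) := by
  simp only [stepN]
  by_cases hg : d.contains g
  · simp only [hg, if_true]
    by_cases hn : (d.getD g PySem.Dict.empty).contains n
    · simp [hn]
    · simp [hn, PySem.Dict.getD_insert_self, PySem.Dict.insert_insert_self,
        PySem.Dict.getD_of_not_contains _ _ (by simpa using hn)]
  · simp only [hg]
    simp [PySem.Dict.getD_insert_self, PySem.Dict.insert_insert_self,
      PySem.Dict.getD_of_not_contains _ _ (by simpa using hg),
      PySem.Dict.contains_empty, PySem.Dict.getD_empty]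

-- B's setdefault step equals pStep.
lemma stepB_eq (r : PySem.Dict String (PySem.Dict String Int)) (q : (String × String) × Int) :
    (let r1 := r.setdefault q.1.1 PySem.Dict.empty
     r1.insert q.1.1 ((r1.getD q.1.1 PySem.Dict.empty).insert q.1.2 q.2)) = pStep r q := by
  simp only [pStep]
  by_cases h : r.contains q.1.1
  · simp [PySem.Dict.setdefault_of_contains _ _ h]
  · simp [PySem.Dict.setdefault_of_not_contains _ _ (by simpa using h),
      PySem.Dict.getD_insert_self, PySem.Dict.insert_insert_self,
      PySem.Dict.getD_of_not_contains _ _ (by simpa using h)]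

-- getD of an insert-keyed fold localizes to the matching keys.
lemma getD_foldl_insert_key {α κ ν : Type} [BEq κ] [LawfulBEq κ] [DecidableEq κ]
    (key : α → κ) (f : ν → α → ν) (d0 : ν) (c : κ) :
    ∀ (L : List α) (r : PySem.Dict κ ν),
      (L.foldl (fun r x => r.insert (key x) (f (r.getD (key x) d0) x)) r).getD c d0
        = (L.filter (fun x => key x == c)).foldl f (r.getD c d0) := by
  intro L
  induction L with
  | nil => intro r; simp
  | cons x L ih =>
    intro r
    simp only [List.foldl_cons, List.filter_cons]
    by_cases h : key x = c
    · subst h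
      simp [ih, PySem.Dict.getD_insert_self]
    · rw [ih]
      have hne : ¬ (key x == c) = true := by simp [h]
      simp [hne, PySem.Dict.getD_insert_of_ne _ _ _ (fun hc => h hc.symm)]

lemma ofList_map_ofList {α β : Type} [BEq α] [LawfulBEq α] [BEq β] [LawfulBEq β]
    (f : α → β) (l : List α) :
    PySem.Set.ofList ((PySem.Set.ofList l).map f) = PySem.Set.ofList (l.map f) := by
  induction l using List.reverseRecOn with
  | nil => simp [PySem.Set.ofList_nil]
  | append_singleton l x ih =>
    rw [PySem.Set.ofList_append_singleton, List.map_append, List.map_singleton,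
      PySem.Set.ofList_append_singleton]
    by_cases h : x ∈ PySem.Set.ofList l
    · rw [PySem.Set.add_of_mem h, ih, PySem.Set.add_of_mem]
      rw [PySem.Set.mem_ofList]
      exact List.mem_map_of_mem ((PySem.Set.mem_ofList _ _).mp h)
    · rw [PySem.Set.add_of_not_mem h, List.map_append, List.map_singleton,
        PySem.Set.ofList_append_singleton, ih]

lemma ofList_snd_filter (g : String) (l : List (String × String)) :
    PySem.Set.ofList ((l.filter (fun p => p.1 == g)).map (·.2))
      = ((PySem.Set.ofList l).filter (fun p => p.1 == g)).map (·.2) := by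
  induction l using List.reverseRecOn with
  | nil => simp [PySem.Set.ofList_nil]
  | append_singleton l p ih =>
    rw [List.filter_append, PySem.Set.ofList_append_singleton]
    by_cases hg : (p.1 == g) = true
    · simp only [List.filter_cons, List.filter_nil, hg, if_true, List.map_append,
        List.map_singleton, PySem.Set.ofList_append_singleton, ih]
      by_cases h : p ∈ PySem.Set.ofList l
      · rw [PySem.Set.add_of_mem h, PySem.Set.add_of_mem]
        refine List.mem_map_of_mem ?_
        rw [List.mem_filter]
        exact ⟨h, hg⟩
      · rw [PySem.Set.add_of_not_mem h, List.filter_append, List.map_append]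
        have hp2 : p.2 ∉ ((PySem.Set.ofList l).filter (fun p => p.1 == g)).map (·.2) := by
          intro hmem
          rcases List.mem_map.mp hmem with ⟨q, hq, hq2⟩
          rcases List.mem_filter.mp hq with ⟨hql, hqg⟩
          have : q = p := by
            apply Prod.ext
            · exact (eq_of_beq hqg).trans (eq_of_beq hg).symm
            · exact hq2
          exact h (this ▸ hql)
        rw [← ih, PySem.Set.add_of_not_mem (by rw [ih]; exact hp2), ih]
        simp [hg]
    · simp only [List.filter_cons, List.filter_nil, hg]
      simp only [Bool.false_eq_true, if_false, List.append_nil, ih]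
      by_cases h : p ∈ PySem.Set.ofList l
      · rw [PySem.Set.add_of_mem h]
      · rw [PySem.Set.add_of_not_mem h, List.filter_append]
        simp [hg]

lemma count_snd_filter (g n : String) (l : List (String × String)) :
    ((l.filter (fun p => p.1 == g)).map (·.2)).count n = l.count (g, n) := by
  induction l with
  | nil => simp
  | cons p l ih =>
    simp only [List.filter_cons, List.count_cons, ← ih]
    by_cases hg : (p.1 == g) = true
    · simp only [hg, if_true, List.map_cons, List.count_cons]
      congr 1
      rcases p with ⟨p1, p2⟩
      have h1 : p1 = g := eq_of_beq hg
      subst h1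
      simp [Prod.ext_iff]
    · simp only [hg]
      rcases p with ⟨p1, p2⟩
      have : ¬ ((p1, p2) = (g, n)) := by
        intro hc
        exact hg (by simp [Prod.ext_iff] at hc; simp [hc.1])
      simp [this, beq_iff_eq]

-- inner dict of the nested build at g = counter of next words after g
lemma nested_getD (l : List (String × String)) (g : String) :
    (nestedBuild l).getD g PySem.Dict.empty
      = PySem.Dict.counter ((l.filter (fun p => p.1 == g)).map (·.2)) := by
  have h := getD_foldl_insert_key (fun p : String × String => p.1)
    (fun (i : PySem.Dict String Int) (p : String × String) => i.insert p.2 (i.getD p.2 0 + 1))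
    PySem.Dict.empty g l PySem.Dict.empty
  have h2 : (nestedBuild l).getD g PySem.Dict.empty
      = (l.filter (fun p => p.1 == g)).foldl
          (fun (i : PySem.Dict String Int) (p : String × String) => i.insert p.2 (i.getD p.2 0 + 1))
          (PySem.Dict.empty.getD g PySem.Dict.empty) := h
  rw [h2, PySem.Dict.getD_empty, ← PySem.Dict.foldl_insert_getD_add_one_eq_counter,
    List.foldl_map]

lemma pivot_getD (l : List (String × String)) (g : String) :
    (pivotD (PySem.Dict.counter l)).getD g PySem.Dict.empty
      = PySem.Dict.mk (((PySem.Set.ofList l).filter (fun p => p.1 == g)).map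
          (fun p => (p.2, (l.count p : Int)))) := by
  have h : (pivotD (PySem.Dict.counter l)).getD g PySem.Dict.empty
      = ((PySem.Dict.counter l).items.filter (fun q => q.1.1 == g)).foldl
          (fun (i : PySem.Dict String Int) (q : (String × String) × Int) => i.insert q.1.2 q.2)
          (PySem.Dict.empty.getD g PySem.Dict.empty) :=
    getD_foldl_insert_key (fun q : (String × String) × Int => q.1.1)
      (fun (i : PySem.Dict String Int) (q : (String × String) × Int) => i.insert q.1.2 q.2)
      PySem.Dict.empty g (PySem.Dict.counter l).items PySem.Dict.empty
  rw [h, PySem.Dict.getD_empty, PySem.Dict.items_counter]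
  have hfm : (((PySem.Set.ofList l).map (fun k => (k, (l.count k : Int)))).filter
        (fun q => q.1.1 == g))
      = ((PySem.Set.ofList l).filter (fun p => p.1 == g)).map
          (fun k => (k, (l.count k : Int))) := by
    rw [List.filter_map]
    rfl
  rw [hfm, List.foldl_map]
  have hnd : (((PySem.Set.ofList l).filter (fun p => p.1 == g)).map
      (fun p : String × String => p.2)).Nodup := by
    apply List.Nodup.map_on
    · intro x hx y hy hxy
      rcases List.mem_filter.mp hx with ⟨_, hxg⟩
      rcases List.mem_filter.mp hy with ⟨_, hyg⟩
      exact Prod.ext ((eq_of_beq hxg).trans (eq_of_beq hyg).symm) hxy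
    · exact (PySem.Set.nodup_ofList l).filter _
  have hfresh := PySem.Dict.items_foldl_insert_fresh
    ((PySem.Set.ofList l).filter (fun p => p.1 == g))
    (fun p : String × String => p.2) (fun p => (l.count p : Int)) PySem.Dict.empty
    (fun a _ => by simp [PySem.Dict.contains_empty]) hnd
  apply PySem.Dict.ext
  have hb : (((PySem.Set.ofList l).filter (fun p => p.1 == g)).foldl
        (fun (i : PySem.Dict String Int) (k : String × String) => i.insert k.2 (l.count k : Int))
        PySem.Dict.empty).items
      = PySem.Dict.empty.items ++ ((PySem.Set.ofList l).filter (fun p => p.1 == g)).map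
          (fun p => (p.2, (l.count p : Int))) := hfresh
  rw [hb]
  rfl

lemma inner_eq (l : List (String × String)) (g : String) :
    PySem.Dict.counter ((l.filter (fun p => p.1 == g)).map (·.2))
      = PySem.Dict.mk (((PySem.Set.ofList l).filter (fun p => p.1 == g)).map
          (fun p => (p.2, (l.count p : Int)))) := by
  apply PySem.Dict.ext
  rw [PySem.Dict.items_counter, ofList_snd_filter, List.map_map]
  show _ = ((PySem.Set.ofList l).filter (fun p => p.1 == g)).map
      (fun p => (p.2, (l.count p : Int)))
  apply List.map_congr_left
  intro p hp
  rcases List.mem_filter.mp hp with ⟨_, hpg⟩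
  have h1 : p.1 = g := eq_of_beq hpg
  have h2 : (g, p.2) = p := Prod.ext h1.symm rfl
  simp only [Function.comp]
  rw [count_snd_filter, h2]

lemma nested_keys (l : List (String × String)) :
    (nestedBuild l).keys = PySem.Set.ofList (l.map (·.1)) := by
  have h : (nestedBuild l).keys = PySem.Set.update PySem.Dict.empty.keys (l.map (fun p => p.1)) :=
    PySem.Dict.keys_foldl_insert_key l (fun p : String × String => p.1)
      (fun d p => (d.getD p.1 PySem.Dict.empty).insert p.2
        ((d.getD p.1 PySem.Dict.empty).getD p.2 0 + 1)) PySem.Dict.empty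
  rw [h, PySem.Dict.keys_empty, PySem.Set.update_nil_left]

lemma pivot_keys (l : List (String × String)) :
    (pivotD (PySem.Dict.counter l)).keys = PySem.Set.ofList (l.map (·.1)) := by
  have h : (pivotD (PySem.Dict.counter l)).keys
      = PySem.Set.update PySem.Dict.empty.keys ((PySem.Dict.counter l).items.map (fun q => q.1.1)) :=
    PySem.Dict.keys_foldl_insert_key _ (fun q : (String × String) × Int => q.1.1)
      (fun r q => (r.getD q.1.1 PySem.Dict.empty).insert q.1.2 q.2) PySem.Dict.empty
  rw [h, PySem.Dict.keys_empty, PySem.Set.update_nil_left, PySem.Dict.items_counter,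
    List.map_map]
  have : ((fun q : (String × String) × Int => q.1.1) ∘ (fun k : String × String => (k, (l.count k : Int))))
      = (fun p : String × String => p.1) := rfl
  rw [this, ofList_map_ofList]

-- main: building the nested dict directly = pivoting the flat counter
lemma nested_eq_pivot (l : List (String × String)) :
    nestedBuild l = pivotD (PySem.Dict.counter l) := by
  have hnd1 : (nestedBuild l).keys.Nodup :=
    PySem.Dict.nodup_keys_foldl_insert_key l (fun p : String × String => p.1)
      (fun d p => (d.getD p.1 PySem.Dict.empty).insert p.2
        ((d.getD p.1 PySem.Dict.empty).getD p.2 0 + 1)) PySem.Dict.empty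
      PySem.Dict.nodup_keys_empty
  have hnd2 : (pivotD (PySem.Dict.counter l)).keys.Nodup :=
    PySem.Dict.nodup_keys_foldl_insert_key _ (fun q : (String × String) × Int => q.1.1)
      (fun r q => (r.getD q.1.1 PySem.Dict.empty).insert q.1.2 q.2) PySem.Dict.empty
      PySem.Dict.nodup_keys_empty
  apply PySem.Dict.ext
  rw [PySem.Dict.items_eq_map_keys _ hnd1 PySem.Dict.empty,
    PySem.Dict.items_eq_map_keys _ hnd2 PySem.Dict.empty, nested_keys, pivot_keys]
  apply List.map_congr_left
  intro g _
  rw [nested_getD, pivot_getD, inner_eq]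

-- the zipped slices are exactly the indexed windows
lemma windows_eq (tw : List String) :
    ((tw.zip (tw.drop 1)).zip (tw.drop 2)).zip (tw.drop 3)
      = (List.range (tw.length - 3)).map (winAt tw) := by
  apply List.ext_getElem
  · simp; omega
  · intro i h1 h2
    simp only [List.getElem_zip, List.getElem_map, List.getElem_range, winAt]
    simp only [List.length_zip, List.length_drop] at h1
    have hi : i < tw.length - 3 := by omega
    rw [List.getElem_drop, List.getElem_drop, List.getElem_drop]
    rw [List.getD_eq_getElem tw "" (by omega), List.getD_eq_getElem tw "" (by omega),
      List.getD_eq_getElem tw "" (by omega), List.getD_eq_getElem tw "" (by omega)]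
    simp [Nat.add_comm]

lemma ingest_eq (tw : List String) :
    ingest tw = (nestedBuild (((List.range (tw.length - 3)).map (winAt tw)).map keyfun)).items.map
      (fun p => (p.1, p.2.items)) := by
  have hstep : ∀ (acc : PySem.Dict String (PySem.Dict String Int)) (k : Nat),
      (let word_0 := PySem.List.pyGetD tw ((0:Int) + (k:Int)) ""
       let word_1 := PySem.List.pyGetD tw ((0:Int) + (k:Int) + 1) ""
       let word_2 := PySem.List.pyGetD tw ((0:Int) + (k:Int) + 2) ""
       let n_gram := PySem.Str.join "-" [word_0, word_1, word_2]
       let m1 := if acc.contains n_gram then acc else acc.insert n_gram PySem.Dict.empty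
       let next_word := PySem.List.pyGetD tw ((0:Int) + (k:Int) + 3) ""
       let inner := m1.getD n_gram PySem.Dict.empty
       let inner2 := if inner.contains next_word then inner else inner.insert next_word 0
       m1.insert n_gram (inner2.insert next_word (inner2.getD next_word 0 + 1)))
      = stepN acc (keyfun (winAt tw k)) := by
    intro acc k
    have e0 : (0:Int) + (k:Int) = ((k : Nat) : Int) := by omega
    have e1 : (0:Int) + (k:Int) + 1 = ((k + 1 : Nat) : Int) := by push_cast; ring
    have e2 : (0:Int) + (k:Int) + 2 = ((k + 2 : Nat) : Int) := by push_cast; ring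
    have e3 : (0:Int) + (k:Int) + 3 = ((k + 3 : Nat) : Int) := by push_cast; ring
    rw [e1, e2, e3, e0, PySem.List.pyGetD_natCast, PySem.List.pyGetD_natCast,
      PySem.List.pyGetD_natCast, PySem.List.pyGetD_natCast]
    exact stepA_eq acc (PySem.Str.join "-" [tw.getD k "", tw.getD (k+1) "", tw.getD (k+2) ""])
      (tw.getD (k+3) "")
  simp only [ingest]
  rw [PySem.List.pyRange_one]
  have hn : (((tw.length : Int) - 3) - 0).toNat = tw.length - 3 := by omega
  rw [hn, List.foldl_map]
  refine congrArg (fun (d : PySem.Dict String (PySem.Dict String Int)) =>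
    d.items.map (fun p => (p.1, p.2.items))) ?_
  calc (List.range (tw.length - 3)).foldl _ PySem.Dict.empty
      = (List.range (tw.length - 3)).foldl
          (fun acc k => stepN acc (keyfun (winAt tw k))) PySem.Dict.empty := by
        apply PySem.List.foldl_congr_mem
        intro acc k _
        exact hstep acc k
    _ = nestedBuild (((List.range (tw.length - 3)).map (winAt tw)).map keyfun) := by
        rw [List.map_map]
        exact (@List.foldl_map _ _ _ (keyfun ∘ winAt tw) stepN (List.range (tw.length - 3))
          PySem.Dict.empty).symm

lemma ingest_alt_eq (tw : List String) :
    ingest_alt tw = (pivotD (PySem.Dict.counter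
        (((List.range (tw.length - 3)).map (winAt tw)).map keyfun))).items.map
      (fun p => (p.1, p.2.items)) := by
  have hs1 : PySem.List.slice tw (some 1) none = tw.drop 1 := by
    rw [PySem.List.slice_from tw (by norm_num : (0:Int) ≤ 1)]
    rfl
  have hs2 : PySem.List.slice tw (some 2) none = tw.drop 2 := by
    rw [PySem.List.slice_from tw (by norm_num : (0:Int) ≤ 2)]
    rfl
  have hs3 : PySem.List.slice tw (some 3) none = tw.drop 3 := by
    rw [PySem.List.slice_from tw (by norm_num : (0:Int) ≤ 3)]
    rfl
  simp only [ingest_alt]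
  rw [hs1, hs2, hs3, windows_eq]
  have hc : ((List.range (tw.length - 3)).map (winAt tw)).foldl
      (fun (counts : PySem.Dict (String × String) Int) w =>
        counts.insert (PySem.Str.join "-" [w.1.1.1, w.1.1.2, w.1.2], w.2)
          (counts.getD (PySem.Str.join "-" [w.1.1.1, w.1.1.2, w.1.2], w.2) 0 + 1))
      PySem.Dict.empty
      = PySem.Dict.counter (((List.range (tw.length - 3)).map (winAt tw)).map keyfun) := by
    have h1 := @List.foldl_map _ _ _ keyfun
      (fun (c : PySem.Dict (String × String) Int) (k : String × String) =>
        c.insert k (c.getD k 0 + 1))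
      ((List.range (tw.length - 3)).map (winAt tw)) PySem.Dict.empty
    rw [PySem.Dict.foldl_insert_getD_add_one_eq_counter] at h1
    exact h1.symm
  rw [hc]
  have hp : (PySem.Dict.counter
        (((List.range (tw.length - 3)).map (winAt tw)).map keyfun)).items.foldl
      (fun (result : PySem.Dict String (PySem.Dict String Int)) q =>
        (result.setdefault q.1.1 PySem.Dict.empty).insert q.1.1
          (((result.setdefault q.1.1 PySem.Dict.empty).getD q.1.1 PySem.Dict.empty).insert
            q.1.2 q.2))
      PySem.Dict.empty
      = pivotD (PySem.Dict.counter
          (((List.range (tw.length - 3)).map (winAt tw)).map keyfun)) := by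
    apply PySem.List.foldl_congr_mem
    intro acc q _
    exact stepB_eq acc q
  rw [hp]

-- ===== VERDICT (by name: the statement is the Claim_ definition above) =====
theorem ingest_spec : Claim_equal_ingest := by
  intro tw _
  unfold Spec_ingest
  rw [ingest_eq, ingest_alt_eq, nested_eq_pivot]
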